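-- pv_equiv track=rewrite | github.com/EkaterinaShirkevich/Py_Sem | Lesson5/2_Task.py | find_list
-- ===== SOURCE A (Python) =====
-- def find_list(ls: list):
--     res = []
--     for i in range(len(ls)):
--         cur = ls[i]
--         cur_list = [cur]
--         for k in range(i, len(ls)):
--             if ls[k] > cur:
--                 cur_list.append(ls[k])
--                 cur = ls[k]
--         if len(cur_list) > 1:
--             res.append(cur_list)
--     return res
-- ===== SOURCE B (Python) =====
-- def _merge(x, chain):
--     # drop leading elements <= x, then prepend x
--     while chain and chain[0] <= x:
--         chain = chain[1:]
--     return [x] + chain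
--
-- def find_list(ls: list):
--     # right-to-left pass reusing each suffix's chain: the greedy increasing
--     # chain starting at i is ls[i] followed by the part of the chain of i+1
--     # that is strictly greater than ls[i]
--     chain = []
--     res = []
--     for x in reversed(ls):
--         chain = _merge(x, chain)
--         if len(chain) > 1:
--             res.append(chain)
--     res.reverse()
--     return res
-- ===== Notes on version B (the rewrite author's own statement) =====
-- stated objective: alternative
-- what changed: A rescans the whole remaining suffix for every start index; B makes one right-to-left pass maintaining the current suffix's greedy chain, deriving each chain from the next suffix's chain by dropping its leading elements <= the new head.
import Mathlib
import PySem

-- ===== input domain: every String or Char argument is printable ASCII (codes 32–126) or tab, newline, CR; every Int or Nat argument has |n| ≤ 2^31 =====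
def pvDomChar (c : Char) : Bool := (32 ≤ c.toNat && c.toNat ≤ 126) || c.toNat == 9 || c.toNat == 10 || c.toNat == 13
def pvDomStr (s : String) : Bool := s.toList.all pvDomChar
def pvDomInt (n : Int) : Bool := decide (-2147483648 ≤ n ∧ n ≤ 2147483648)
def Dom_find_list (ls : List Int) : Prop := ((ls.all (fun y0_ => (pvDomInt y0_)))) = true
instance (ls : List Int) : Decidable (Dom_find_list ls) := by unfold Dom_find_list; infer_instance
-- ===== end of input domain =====

-- B replaces A's per-index rescan of the whole suffix by one right-to-left pass that
-- reuses the next suffix's greedy chain (objective: alternative decomposition).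

-- ===== PORT A =====
def find_list (ls : List Int) : List (List Int) :=
  (PySem.List.pyRange 0 (ls.length : Int) 1).foldl (fun res i =>
    let cur := PySem.List.pyGetD ls i 0
    let st := (PySem.List.pyRange i (ls.length : Int) 1).foldl
      (fun (p : Int × List Int) k =>
        let v := PySem.List.pyGetD ls k 0
        if p.1 < v then (v, p.2 ++ [v]) else p) (cur, [cur])
    if 1 < st.2.length then res ++ [st.2] else res) []

-- ===== PORT B =====
-- _merge: drop leading elements ≤ x from the chain, prepend x
def pvMerge (x : Int) : List Int → List Int
  | [] => [x]
  | c :: rest => if c ≤ x then pvMerge x rest else x :: c :: rest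

-- loop over reversed(ls) with res.append + final res.reverse(), as a foldr
def find_list_alt (ls : List Int) : List (List Int) :=
  (ls.foldr (fun x (st : List Int × List (List Int)) =>
    let chain := pvMerge x st.1
    (chain, if 1 < chain.length then chain :: st.2 else st.2)) ([], [])).2

-- ===== PRECONDITION & SPEC =====
def Spec_find_list (ls : List Int) (out : List (List Int)) : Prop := out = find_list_alt ls
instance (ls : List Int) (out : List (List Int)) : Decidable (Spec_find_list ls out) := by unfold Spec_find_list; infer_instance

-- ===== CLAIM (what is proved, stated in full; the proofs are below) =====
def Claim_equal_find_list : Prop := ∀ (ls : List Int), Dom_find_list ls → Spec_find_list ls (find_list ls)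

-- ===== LEMMAS AND PROOFS =====

-- greedy continuation: elements strictly above the running max
def pvG (c : Int) : List Int → List Int
  | [] => []
  | x :: xs => if c < x then x :: pvG x xs else pvG c xs

-- the greedy chain starting at the head of a nonempty list
def pvCh : List Int → List Int
  | [] => []
  | x :: xs => x :: pvG x xs

-- reference result: one chain per suffix, kept when longer than 1
def pvS : List Int → List (List Int)
  | [] => []
  | x :: xs => (if 1 < (pvCh (x :: xs)).length then [pvCh (x :: xs)] else []) ++ pvS xs

def pvDropLe (x : Int) : List Int → List Int
  | [] => []
  | c :: rest => if c ≤ x then pvDropLe x rest else c :: rest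

theorem pvMerge_eq (x : Int) (l : List Int) : pvMerge x l = x :: pvDropLe x l := by
  induction l with
  | nil => rfl
  | cons c rest ih => simp only [pvMerge, pvDropLe]; split <;> simp [ih]

theorem pvDropLe_dropLe (x y : Int) (h : y ≤ x) (l : List Int) :
    pvDropLe x (pvDropLe y l) = pvDropLe x l := by
  induction l with
  | nil => rfl
  | cons c rest ih =>
    simp only [pvDropLe]
    by_cases hc : c ≤ y
    · have hcx : c ≤ x := le_trans hc h
      simp [hc, hcx, ih]
    · simp only [if_neg hc]
      by_cases hcx : c ≤ x
      · simp [pvDropLe, hcx]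
      · simp [pvDropLe, hcx]

theorem pvG_eq (xs : List Int) : ∀ c, pvG c xs = pvDropLe c (pvCh xs) := by
  induction xs with
  | nil => intro c; rfl
  | cons y ys ih =>
    intro c
    simp only [pvG, pvCh, pvDropLe]
    by_cases h : c < y
    · have : ¬ y ≤ c := by omega
      simp [h, this]
    · have hyc : y ≤ c := by omega
      simp only [if_neg h, if_pos hyc, ih c, ih y, pvDropLe_dropLe c y hyc]

theorem pvCh_cons (x : Int) (xs : List Int) : pvCh (x :: xs) = pvMerge x (pvCh xs) := by
  rw [pvMerge_eq]
  cases xs with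
  | nil => rfl
  | cons y ys =>
    show x :: pvG x (y :: ys) = x :: pvDropLe x (pvCh (y :: ys))
    rw [pvG_eq]

-- B's fold computes (chain of the whole list, pvS)
theorem pvB_fold (ls : List Int) :
    ls.foldr (fun x (st : List Int × List (List Int)) =>
      let chain := pvMerge x st.1
      (chain, if 1 < chain.length then chain :: st.2 else st.2)) ([], [])
      = (pvCh ls, pvS ls) := by
  induction ls with
  | nil => rfl
  | cons x xs ih =>
    simp only [List.foldr_cons, ih, ← pvCh_cons, pvS]
    split <;> simp

-- A's inner loop accumulates the greedy continuation
theorem pvInner (xs : List Int) : ∀ (c : Int) (acc : List Int),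
    xs.foldl (fun (p : Int × List Int) v => if p.1 < v then (v, p.2 ++ [v]) else p) (c, acc)
      = ((c :: pvG c xs).getLast (by simp), acc ++ pvG c xs) := by
  induction xs with
  | nil => intro c acc; simp [pvG]
  | cons y ys ih =>
    intro c acc
    simp only [List.foldl_cons, pvG]
    by_cases h : c < y
    · simp only [if_pos h, ih y (acc ++ [y])]
      refine Prod.ext ?_ (by simp)
      show (y :: pvG y ys).getLast (by simp) = (c :: y :: pvG y ys).getLast (by simp)
      exact (List.getLast_cons (by simp)).symm
    · simp only [if_neg h, ih c acc]

theorem pvG_self (c : Int) (xs : List Int) : pvG c (c :: xs) = pvG c xs := by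
  simp [pvG]

-- named copies of A's loop bodies (definitionally equal to the port's lambdas)
def pvInnerF (p : Int × List Int) (v : Int) : Int × List Int :=
  if p.1 < v then (v, p.2 ++ [v]) else p

def pvBodyA (ls : List Int) (res : List (List Int)) (i : Int) : List (List Int) :=
  let cur := PySem.List.pyGetD ls i 0
  let st := (PySem.List.pyRange i (ls.length : Int) 1).foldl
    (fun (p : Int × List Int) k =>
      let v := PySem.List.pyGetD ls k 0
      if p.1 < v then (v, p.2 ++ [v]) else p) (cur, [cur])
  if 1 < st.2.length then res ++ [st.2] else res

theorem pvBodyA_eq (ls : List Int) (res : List (List Int)) (a : ℕ) (ha : a < ls.length) :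
    pvBodyA ls res (a : Int)
      = if 1 < (pvCh (ls.drop a)).length then res ++ [pvCh (ls.drop a)] else res := by
  have hcur : PySem.List.pyGetD ls (a : Int) 0 = ls[a] := by
    rw [PySem.List.pyGetD_eq_getElem ls 0 (by omega) (by exact_mod_cast ha)]
    simp
  have hdrop : ls.drop a = ls[a] :: ls.drop (a + 1) := List.drop_eq_getElem_cons ha
  have hinner :
      (PySem.List.pyRange (a : Int) (ls.length : Int) 1).foldl
        (fun (p : Int × List Int) k =>
          let v := PySem.List.pyGetD ls k 0
          if p.1 < v then (v, p.2 ++ [v]) else p) (ls[a], [ls[a]])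
      = ((ls[a] :: pvG ls[a] (ls.drop a)).getLast (by simp), [ls[a]] ++ pvG ls[a] (ls.drop a)) := by
    have hb := PySem.List.foldl_pyRange_pyGetD' ls 0 pvInnerF (ls[a], [ls[a]]) (a := (a : Int)) (by omega)
    simp only [Int.toNat_natCast] at hb
    have : (fun (acc : Int × List Int) (j : Int) => pvInnerF acc (PySem.List.pyGetD ls j 0))
        = (fun (p : Int × List Int) k =>
            let v := PySem.List.pyGetD ls k 0
            if p.1 < v then (v, p.2 ++ [v]) else p) := rfl
    rw [this] at hb
    rw [hb]
    exact pvInner (ls.drop a) ls[a] [ls[a]]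
  have hch : [ls[a]] ++ pvG ls[a] (ls.drop a) = pvCh (ls.drop a) := by
    rw [hdrop, pvG_self, pvCh]; rfl
  unfold pvBodyA
  rw [hcur]
  simp only [hinner, hch]

-- A's outer loop from index a yields pvS of the suffix
theorem pvOuter (ls : List Int) : ∀ (d a : ℕ) (res : List (List Int)),
    ls.length = a + d →
    (PySem.List.pyRange (a : Int) (ls.length : Int) 1).foldl (pvBodyA ls) res
      = res ++ pvS (ls.drop a) := by
  intro d
  induction d with
  | zero =>
    intro a res h
    rw [PySem.List.pyRange_one_eq_nil (by omega)]
    simp [List.drop_eq_nil_of_le (by omega : ls.length ≤ a), pvS]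
  | succ d ih =>
    intro a res h
    have ha : a < ls.length := by omega
    rw [PySem.List.pyRange_one_cons (by exact_mod_cast ha)]
    rw [List.foldl_cons, pvBodyA_eq ls res a ha]
    have hcast : ((a : Int) + 1) = ((a + 1 : ℕ) : Int) := by push_cast; ring
    rw [hcast, ih (a + 1) _ (by omega)]
    have hdrop : ls.drop a = ls[a] :: ls.drop (a + 1) := List.drop_eq_getElem_cons ha
    rw [hdrop]
    show _ = res ++ pvS (ls[a] :: ls.drop (a + 1))
    simp only [pvS, ← hdrop]
    split <;> simp

-- ===== VERDICT (by name: the statement is the Claim_ definition above) =====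
theorem find_list_spec : Claim_equal_find_list := by
  intro ls _
  unfold Spec_find_list find_list find_list_alt
  rw [pvB_fold]
  have h := pvOuter ls ls.length 0 [] (by omega)
  simp only [Nat.cast_zero, List.drop_zero, List.nil_append] at h
  exact h
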